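-- pv_equiv track=rewrite | github.com/ooblog/LTsv10kanedit | LTsv/LTsv_file.py | LTsv_pickdatanum
-- ===== SOURCE A (Python) =====
-- def LTsv_pickdatanum(LTsv_line,LTsv_datanum,LTsv_default=None):
--     LTsv_data="" if LTsv_default is None else LTsv_default
--     LTsv_datadeno=0; LTsv_splits=LTsv_line.replace('\n','\t').split('\t')
--     for LTsv_split in LTsv_splits:
--         if len(LTsv_split) > 0:
--             if LTsv_datanum == LTsv_datadeno:
--                 LTsv_data=LTsv_split
--                 break
--             LTsv_datadeno+=1
--     return LTsv_data
-- ===== SOURCE B (Python) =====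
-- def LTsv_pickdatanum(LTsv_line, LTsv_datanum, LTsv_default=None):
--     # Character-level scan: walk the raw string once, skipping separator runs and
--     # whole tokens, without ever building the split list.
--     if LTsv_datanum >= 0:
--         k = LTsv_datanum
--         i = 0
--         n = len(LTsv_line)
--         while i < n:
--             c = LTsv_line[i]
--             if c == '\t' or c == '\n':
--                 i += 1
--             elif k > 0:
--                 while i < n and LTsv_line[i] != '\t' and LTsv_line[i] != '\n':
--                     i += 1
--                 k -= 1
--             else:
--                 j = i
--                 while j < n and LTsv_line[j] != '\t' and LTsv_line[j] != '\n':
--                     j += 1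
--                 return LTsv_line[i:j]
--     return "" if LTsv_default is None else LTsv_default
-- ===== Notes on version B (the rewrite author's own statement) =====
-- stated objective: alternative
-- what changed: Replaces A's replace-then-split-then-count pipeline with a direct single character-level scan of the raw string that skips separator runs and whole tokens in place and slices out the n-th token, never materialising the split list.
import Mathlib
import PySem

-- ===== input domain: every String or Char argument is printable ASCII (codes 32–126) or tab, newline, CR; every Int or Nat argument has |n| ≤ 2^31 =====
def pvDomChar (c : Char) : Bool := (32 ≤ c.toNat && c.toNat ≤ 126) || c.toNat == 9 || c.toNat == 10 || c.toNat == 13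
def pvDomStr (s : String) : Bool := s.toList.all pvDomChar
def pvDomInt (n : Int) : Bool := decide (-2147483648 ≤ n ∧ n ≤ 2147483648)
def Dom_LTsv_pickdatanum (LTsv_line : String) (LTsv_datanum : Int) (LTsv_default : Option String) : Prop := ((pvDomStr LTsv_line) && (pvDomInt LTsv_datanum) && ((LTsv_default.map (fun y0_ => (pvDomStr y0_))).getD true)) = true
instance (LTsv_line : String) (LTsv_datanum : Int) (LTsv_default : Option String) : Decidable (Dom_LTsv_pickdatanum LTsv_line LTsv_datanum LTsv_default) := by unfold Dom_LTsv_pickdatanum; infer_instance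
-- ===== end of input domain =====

-- B replaces A's replace-then-split-then-count pipeline by one direct character-level
-- scan of the raw string (skip separator runs / skip whole tokens / slice out the
-- n-th token); objective: alternative, same cost, no split list materialised.

-- ===== PORT A =====
-- the for-loop with counter LTsv_datadeno and break, as structural recursion over the splits
def pvA_loop (splits : List String) (datanum deno : Int) (data : String) : String :=
  match splits with
  | [] => data
  | s :: rest =>
    if PySem.Str.len s > 0 then
      if datanum = deno then s
      else pvA_loop rest datanum (deno + 1) data
    else pvA_loop rest datanum deno data

def LTsv_pickdatanum (LTsv_line : String) (LTsv_datanum : Int) (LTsv_default : Option String) : String :=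
  let data := LTsv_default.getD ""
  let splits := (PySem.Str.split? (PySem.Str.replace LTsv_line "\n" "\t") "\t").getD []
  pvA_loop splits LTsv_datanum 0 data

-- ===== PORT B =====
-- separator test: c == '\t' or c == '\n'
def pvB_isSep (c : Char) : Bool := c = '\t' || c = '\n'

-- inner loop 'collect the field's characters until a separator'
def pvB_take : List Char → List Char
  | [] => []
  | c :: r => if pvB_isSep c then [] else c :: pvB_take r

-- inner loop 'advance i past the current token'
def pvB_skip : List Char → List Char
  | [] => []
  | c :: r => if pvB_isSep c then c :: r else pvB_skip r

theorem pvB_skip_length_le (l : List Char) : (pvB_skip l).length ≤ l.length := by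
  induction l with
  | nil => simp [pvB_skip]
  | cons c r ih =>
    simp only [pvB_skip]
    split
    · exact le_refl _
    · exact le_trans ih (Nat.le_succ _)

-- the outer while loop: remaining characters + remaining token count
def pvB_scan (l : List Char) (k : Int) : Option (List Char) :=
  match l with
  | [] => none
  | c :: r =>
    if pvB_isSep c then pvB_scan r k
    else if k > 0 then pvB_scan (pvB_skip r) (k - 1)
    else some (c :: pvB_take r)
termination_by l.length
decreasing_by
  · simp
  · exact Nat.lt_succ_of_le (pvB_skip_length_le r)

def LTsv_pickdatanum_alt (LTsv_line : String) (LTsv_datanum : Int) (LTsv_default : Option String) : String :=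
  if 0 ≤ LTsv_datanum then
    match pvB_scan LTsv_line.toList LTsv_datanum with
    | some cs => String.ofList cs
    | none => LTsv_default.getD ""
  else LTsv_default.getD ""

-- ===== PRECONDITION & SPEC =====
def Spec_LTsv_pickdatanum (LTsv_line : String) (LTsv_datanum : Int) (LTsv_default : Option String) (out : String) : Prop := out = LTsv_pickdatanum_alt LTsv_line LTsv_datanum LTsv_default
instance (LTsv_line : String) (LTsv_datanum : Int) (LTsv_default : Option String) (out : String) : Decidable (Spec_LTsv_pickdatanum LTsv_line LTsv_datanum LTsv_default out) := by unfold Spec_LTsv_pickdatanum; infer_instance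

-- ===== CLAIM (what is proved, stated in full; the proofs are below) =====
def Claim_equal_LTsv_pickdatanum : Prop := ∀ (LTsv_line : String) (LTsv_datanum : Int) (LTsv_default : Option String), Dom_LTsv_pickdatanum LTsv_line LTsv_datanum LTsv_default → Spec_LTsv_pickdatanum LTsv_line LTsv_datanum LTsv_default (LTsv_pickdatanum LTsv_line LTsv_datanum LTsv_default)

-- ===== LEMMAS AND PROOFS =====

theorem pvStr_len_pos_iff (s : String) : (PySem.Str.len s > 0) ↔ s ≠ "" := by
  rw [show PySem.Str.len s = (s.toList.length : Int) from rfl]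
  constructor
  · intro h hs
    subst hs
    simp at h
  · intro h
    rcases Nat.eq_zero_or_pos s.toList.length with h0 | hp
    · exact absurd (by ext1; simpa using List.length_eq_zero_iff.mp h0) h
    · exact_mod_cast hp

-- A's counter-and-break loop computes a bounds-checked index into the non-empty splits
theorem pvA_loop_eq (splits : List String) (datanum : Int) :
    ∀ (deno : Int) (data : String),
      pvA_loop splits datanum deno data =
        (if deno ≤ datanum ∧ datanum < deno + ((splits.filter (fun s => s ≠ "")).length : Int)
         then PySem.List.pyGetD (splits.filter (fun s => s ≠ "")) (datanum - deno) ""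
         else data) := by
  induction splits with
  | nil =>
    intro deno data
    simp only [pvA_loop, List.filter_nil, List.length_nil]
    rw [if_neg (by omega)]
  | cons s rest ih =>
    intro deno data
    by_cases hs : s = ""
    · have hlen : ¬ (PySem.Str.len s > 0) := fun h => absurd hs ((pvStr_len_pos_iff s).mp h)
      subst hs
      simp only [pvA_loop, if_neg hlen, List.filter_cons]
      simpa using ih deno data
    · have hlen : PySem.Str.len s > 0 := (pvStr_len_pos_iff s).mpr hs
      have hF : List.filter (fun t => decide (t ≠ "")) (s :: rest)
          = s :: List.filter (fun t => decide (t ≠ "")) rest := by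
        simp [hs]
      simp only [pvA_loop, if_pos hlen, hF]
      set F := List.filter (fun t => decide (t ≠ "")) rest with hFdef
      by_cases heq : datanum = deno
      · subst heq
        rw [if_pos rfl, if_pos (by simp only [List.length_cons]; push_cast; omega)]
        have : datanum - datanum = (0 : Int) := by omega
        rw [this, PySem.List.pyGetD_zero_cons]
      · rw [if_neg heq, ih (deno + 1) data]
        by_cases hin : deno + 1 ≤ datanum ∧ datanum < deno + 1 + (F.length : Int)
        · rw [if_pos hin, if_pos (by simp only [List.length_cons]; push_cast; omega)]
          have h1 : (0:Int) ≤ datanum - (deno + 1) := by omega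
          have h2 : datanum - (deno + 1) < (F.length : Int) := by omega
          rw [PySem.List.pyGetD_eq_getElem F "" h1 h2,
              PySem.List.pyGetD_eq_getElem (s :: F) "" (by omega) (by simp only [List.length_cons]; push_cast; omega)]
          have ht : (datanum - deno).toNat = (datanum - (deno + 1)).toNat + 1 := by omega
          simp [ht]
        · rw [if_neg hin, if_neg (by simp only [List.length_cons]; push_cast; omega)]

-- the character substitution performed by line.replace('\n','\t')
def pvSub (c : Char) : Char := if c = '\n' then '\t' else c

theorem pvReplace_go_eq : ∀ (fuel : Nat) (l acc : List Char), l.length ≤ fuel →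
    PySem.Chars.replace.go ['\n'] ['\t'] fuel l acc = acc.reverse ++ l.map pvSub := by
  intro fuel
  induction fuel with
  | zero =>
    intro l acc h
    have : l = [] := List.length_eq_zero_iff.mp (Nat.le_zero.mp h)
    subst this
    simp [PySem.Chars.replace.go]
  | succ f ih =>
    intro l acc h
    match l with
    | [] => simp [PySem.Chars.replace.go]
    | c :: t =>
      simp only [PySem.Chars.replace.go]
      by_cases hc : c = '\n'
      · subst hc
        rw [if_pos (by simp)]
        rw [show List.drop ['\n'].length ('\n' :: t) = t from rfl]
        rw [ih t _ (by simpa using h)]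
        simp [pvSub]
      · rw [if_neg (by simp [List.isPrefixOf]; exact fun hcc => hc hcc.symm)]
        rw [ih t _ (by simpa using h)]
        simp [pvSub, hc]

def pvSplitAux : List Char → List Char → List (List Char)
  | [], cur => [cur.reverse]
  | c :: r, cur => if c = '\t' then cur.reverse :: pvSplitAux r [] else pvSplitAux r (c :: cur)

theorem pvSplitOn_go_eq : ∀ (fuel : Nat) (l cur : List Char) (acc : List (List Char)), l.length ≤ fuel →
    PySem.Chars.splitOn.go ['\t'] fuel l cur acc = acc.reverse ++ pvSplitAux l cur := by
  intro fuel
  induction fuel with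
  | zero =>
    intro l cur acc h
    have : l = [] := List.length_eq_zero_iff.mp (Nat.le_zero.mp h)
    subst this
    simp [PySem.Chars.splitOn.go, pvSplitAux]
  | succ f ih =>
    intro l cur acc h
    match l with
    | [] => simp [PySem.Chars.splitOn.go, pvSplitAux]
    | c :: t =>
      simp only [PySem.Chars.splitOn.go]
      by_cases hc : c = '\t'
      · subst hc
        rw [if_pos (by simp)]
        rw [show List.drop ['\t'].length ('\t' :: t) = t from rfl]
        rw [ih t [] _ (by simpa using h)]
        simp [pvSplitAux]
      · rw [if_neg (by simp [List.isPrefixOf]; exact fun hcc => hc hcc.symm)]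
        rw [ih t (c :: cur) acc (by simpa using h)]
        simp [pvSplitAux, hc]

-- maximal runs of non-separator characters
def pvTokens (p : Char → Bool) : List Char → List (List Char)
  | [] => []
  | c :: r =>
    if p c then pvTokens p r
    else (c :: r.takeWhile (fun d => !p d)) :: pvTokens p (r.dropWhile (fun d => !p d))
termination_by l => l.length
decreasing_by
  · simp
  · exact Nat.lt_succ_of_le (List.length_dropWhile_le _ _)

theorem pvSplitAux_filter (l : List Char) : ∀ cur,
    (pvSplitAux l cur).filter (fun t => t ≠ []) =
      if cur = [] then pvTokens (fun c => c = '\t') l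
      else (cur.reverse ++ l.takeWhile (fun d => !(d = '\t' : Bool))) ::
             pvTokens (fun c => c = '\t') (l.dropWhile (fun d => !(d = '\t' : Bool))) := by
  induction l with
  | nil =>
    intro cur
    by_cases hcur : cur = [] <;>
      simp [pvSplitAux, pvTokens, hcur]
  | cons c r ih =>
    intro cur
    by_cases hc : c = '\t'
    · subst hc
      rw [show pvSplitAux ('\t' :: r) cur = cur.reverse :: pvSplitAux r [] by simp [pvSplitAux]]
      rw [List.filter_cons]
      by_cases hcur : cur = []
      · subst hcur
        simpa [pvTokens] using ih []
      · have hrev : cur.reverse ≠ [] := by simpa using hcur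
        simp only [if_neg hcur] at *
        rw [if_pos (by simpa using hcur)]
        rw [ih []]
        simp [pvTokens]
    · rw [show pvSplitAux (c :: r) cur = pvSplitAux r (c :: cur) by simp [pvSplitAux, hc]]
      rw [ih (c :: cur)]
      rw [if_neg (by simp)]
      by_cases hcur : cur = []
      · subst hcur
        simp [pvTokens, hc]
      · rw [if_neg hcur]
        simp [hc]

theorem pvSub_tab (d : Char) : (decide (pvSub d = '\t')) = pvB_isSep d := by
  by_cases h : d = '\n' <;> simp [pvSub, pvB_isSep, h]

theorem pvSub_of_not_sep (d : Char) (h : pvB_isSep d = false) : pvSub d = d := by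
  simp [pvB_isSep] at h
  simp [pvSub, h.2]

theorem pvTokens_map_sub_aux : ∀ (n : Nat) (l : List Char), l.length ≤ n →
    pvTokens (fun c => c = '\t') (l.map pvSub) = pvTokens pvB_isSep l := by
  intro n
  induction n with
  | zero =>
    intro l h
    have : l = [] := List.length_eq_zero_iff.mp (Nat.le_zero.mp h)
    subst this
    simp [pvTokens]
  | succ m ih =>
    intro l h
    match l with
    | [] => simp [pvTokens]
    | c :: r =>
      rw [List.map_cons]
      by_cases hc : pvB_isSep c
      · have hct : decide (pvSub c = '\t') = true := by rw [pvSub_tab]; exact hc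
        rw [show pvTokens (fun c => c = '\t') (pvSub c :: r.map pvSub)
              = pvTokens (fun c => c = '\t') (r.map pvSub) by
            simp only [pvTokens]; rw [if_pos hct]]
        rw [show pvTokens pvB_isSep (c :: r) = pvTokens pvB_isSep r by
            simp only [pvTokens]; rw [if_pos hc]]
        exact ih r (by simpa using h)
      · have hcf : pvB_isSep c = false := by simpa using hc
        have hct : decide (pvSub c = '\t') = false := by rw [pvSub_tab]; exact hcf
        have htw : (r.map pvSub).takeWhile (fun d => !(decide (d = '\t')))
            = r.takeWhile (fun d => !pvB_isSep d) := by
          rw [List.takeWhile_map]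
          have hpred : ((fun d => !(decide (d = '\t'))) ∘ pvSub) = (fun d => !pvB_isSep d) := by
            funext d
            simp only [Function.comp_apply, pvSub_tab]
          rw [hpred]
          conv_rhs => rw [← List.map_id (List.takeWhile (fun d => !pvB_isSep d) r)]
          refine List.map_congr_left (fun d hd => ?_)
          have := List.mem_takeWhile_imp hd
          simpa using pvSub_of_not_sep d (by simpa using this)
        have hdw : (r.map pvSub).dropWhile (fun d => !(decide (d = '\t')))
            = (r.dropWhile (fun d => !pvB_isSep d)).map pvSub := by
          rw [List.dropWhile_map]
          have hpred : ((fun d => !(decide (d = '\t'))) ∘ pvSub) = (fun d => !pvB_isSep d) := by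
            funext d
            simp only [Function.comp_apply, pvSub_tab]
          rw [hpred]
        rw [show pvTokens (fun c => c = '\t') (pvSub c :: r.map pvSub)
              = (pvSub c :: (r.map pvSub).takeWhile (fun d => !(decide (d = '\t')))) ::
                  pvTokens (fun c => c = '\t') ((r.map pvSub).dropWhile (fun d => !(decide (d = '\t')))) by
            simp only [pvTokens]; rw [if_neg (by simp [hct])]]
        rw [show pvTokens pvB_isSep (c :: r)
              = (c :: r.takeWhile (fun d => !pvB_isSep d)) ::
                  pvTokens pvB_isSep (r.dropWhile (fun d => !pvB_isSep d)) by
            simp only [pvTokens]; rw [if_neg (by simp [hcf])]]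
        rw [htw, hdw, pvSub_of_not_sep c hcf]
        rw [ih _ (le_trans (List.length_dropWhile_le _ _) (by simpa using h))]

theorem pvTokens_map_sub (l : List Char) :
    pvTokens (fun c => c = '\t') (l.map pvSub) = pvTokens pvB_isSep l :=
  pvTokens_map_sub_aux l.length l le_rfl

theorem pvB_take_eq (l : List Char) : pvB_take l = l.takeWhile (fun d => !pvB_isSep d) := by
  induction l with
  | nil => simp [pvB_take]
  | cons c r ih =>
    simp only [pvB_take, List.takeWhile_cons]
    by_cases h : pvB_isSep c <;> simp [h, ih]

theorem pvB_skip_eq (l : List Char) : pvB_skip l = l.dropWhile (fun d => !pvB_isSep d) := by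
  induction l with
  | nil => simp [pvB_skip]
  | cons c r ih =>
    simp only [pvB_skip, List.dropWhile_cons]
    by_cases h : pvB_isSep c <;> simp [h, ih]

theorem pvB_scan_eq_aux : ∀ (n : Nat) (l : List Char), l.length ≤ n → ∀ (k : Int), 0 ≤ k →
    pvB_scan l k = (pvTokens pvB_isSep l)[k.toNat]? := by
  intro n
  induction n with
  | zero =>
    intro l h
    have : l = [] := List.length_eq_zero_iff.mp (Nat.le_zero.mp h)
    subst this
    intro k hk
    simp [pvB_scan, pvTokens]
  | succ m ih =>
    intro l h k hk
    match l with
    | [] => simp [pvB_scan, pvTokens]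
    | c :: r =>
      by_cases hc : pvB_isSep c
      · rw [show pvB_scan (c :: r) k = pvB_scan r k by rw [pvB_scan]; rw [if_pos hc]]
        rw [show pvTokens pvB_isSep (c :: r) = pvTokens pvB_isSep r by
            simp only [pvTokens]; rw [if_pos hc]]
        exact ih r (by simpa using h) k hk
      · have hcf : pvB_isSep c = false := by simpa using hc
        rw [show pvTokens pvB_isSep (c :: r)
              = (c :: r.takeWhile (fun d => !pvB_isSep d)) ::
                  pvTokens pvB_isSep (r.dropWhile (fun d => !pvB_isSep d)) by
            simp only [pvTokens]; rw [if_neg (by simp [hcf])]]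
        by_cases hkpos : k > 0
        · rw [show pvB_scan (c :: r) k = pvB_scan (pvB_skip r) (k - 1) by
            rw [pvB_scan]; rw [if_neg (by simp [hcf]), if_pos hkpos]]
          rw [pvB_skip_eq]
          rw [ih _ (le_trans (List.length_dropWhile_le _ _) (by simpa using h)) (k - 1) (by omega)]
          have hkt : k.toNat = (k - 1).toNat + 1 := by omega
          rw [hkt, List.getElem?_cons_succ]
        · have hk0 : k = 0 := by omega
          subst hk0
          rw [show pvB_scan (c :: r) 0 = some (c :: pvB_take r) by
            rw [pvB_scan]; rw [if_neg (by simp [hcf]), if_neg (by omega)]]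
          rw [pvB_take_eq]
          simp

theorem pvB_scan_eq (l : List Char) (k : Int) (hk : 0 ≤ k) :
    pvB_scan l k = (pvTokens pvB_isSep l)[k.toNat]? :=
  pvB_scan_eq_aux l.length l le_rfl k hk

-- A's non-empty splits are exactly the tokens of the raw line
theorem pvFields_eq (line : String) :
    (((PySem.Str.split? (PySem.Str.replace line "\n" "\t") "\t").getD []).filter (fun s => s ≠ "")) =
      (pvTokens pvB_isSep line.toList).map String.ofList := by
  have htab : ("\t" : String).toList = ['\t'] := by decide
  have hnl : ("\n" : String).toList = ['\n'] := by decide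
  have hrep : (PySem.Str.replace line "\n" "\t").toList = line.toList.map pvSub := by
    rw [PySem.Str.toList_replace, htab, hnl]
    rw [show PySem.Chars.replace line.toList ['\n'] ['\t']
          = PySem.Chars.replace.go ['\n'] ['\t'] line.toList.length line.toList [] by
        simp [PySem.Chars.replace]]
    simpa using pvReplace_go_eq line.toList.length line.toList [] le_rfl
  rw [show PySem.Str.split? (PySem.Str.replace line "\n" "\t") "\t"
        = some (((PySem.Chars.splitOn ((PySem.Str.replace line "\n" "\t")).toList ['\t'])).map String.ofList) by
      simp [PySem.Str.split?, PySem.Chars.split?, htab]]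
  rw [Option.getD_some]
  rw [show PySem.Chars.splitOn (PySem.Str.replace line "\n" "\t").toList ['\t']
        = pvSplitAux (PySem.Str.replace line "\n" "\t").toList [] by
      rw [show PySem.Chars.splitOn (PySem.Str.replace line "\n" "\t").toList ['\t']
            = PySem.Chars.splitOn.go ['\t'] ((PySem.Str.replace line "\n" "\t").toList.length + 1)
                (PySem.Str.replace line "\n" "\t").toList [] [] from rfl]
      simpa using pvSplitOn_go_eq _ _ [] [] (Nat.le_succ _)]
  rw [List.filter_map]
  have hpred : ((fun s => decide (s ≠ "")) ∘ String.ofList) = (fun t => decide (t ≠ [])) := by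
    funext t
    simp only [Function.comp_apply, decide_eq_decide]
    constructor
    · intro hne he
      exact hne (by subst he; decide)
    · intro hne he
      exact hne (by simpa using congrArg String.toList he)
  rw [hpred]
  rw [show (pvSplitAux (PySem.Str.replace line "\n" "\t").toList []).filter (fun t => decide (t ≠ []))
        = pvTokens (fun c => c = '\t') (PySem.Str.replace line "\n" "\t").toList by
      simpa using pvSplitAux_filter (PySem.Str.replace line "\n" "\t").toList []]
  rw [hrep, pvTokens_map_sub]

-- ===== VERDICT (by name: the statement is the Claim_ definition above) =====
theorem LTsv_pickdatanum_spec : Claim_equal_LTsv_pickdatanum := by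
  intro line n d _
  unfold Spec_LTsv_pickdatanum LTsv_pickdatanum LTsv_pickdatanum_alt
  rw [pvA_loop_eq, pvFields_eq line]
  set T := pvTokens pvB_isSep line.toList with hT
  by_cases hn : 0 ≤ n
  · rw [if_pos hn, pvB_scan_eq line.toList n hn, ← hT]
    by_cases hlt : n < (T.length : Int)
    · have hcond : 0 ≤ n ∧ n < 0 + ((T.map String.ofList).length : Int) := by
        constructor
        · exact hn
        · simpa using hlt
      rw [if_pos hcond]
      have hnt : n.toNat < T.length := by omega
      have hsome : T[n.toNat]? = some T[n.toNat] := List.getElem?_eq_getElem hnt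
      rw [hsome]
      have : n - 0 = n := by omega
      rw [this, PySem.List.pyGetD_eq_getElem _ _ hn (by simpa using hlt)]
      simp
    · have hcond : ¬ (0 ≤ n ∧ n < 0 + ((T.map String.ofList).length : Int)) := by
        simp only [List.length_map]
        omega
      rw [if_neg hcond]
      have hnone : T[n.toNat]? = none := List.getElem?_eq_none (by omega)
      rw [hnone]
  · rw [if_neg hn, if_neg (by omega)]
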